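-- pv_equiv track=rewrite | github.com/Satty1714/git_code | qparser_findlable/new_monitor.py | FindComments
-- ===== SOURCE A (Python) =====
-- def FindComments(firstcomment_reminder_str,comments_list):
--     template_list = []
--     for tl in firstcomment_reminder_str.split("\n"):        #excel中的
--         if tl in [" ", ""]:
--             continue
--         template_list.append(tl)
--     for comm in comments_list:                              #网页中的
--         temp_list = []
--         for t2 in template_list:
--             if t2 in comm:                                  #excel中的在网页中
--                 temp_list.append(0)
--             else:
--                 temp_list.append(1)
--         temp_list = list(set(temp_list))
--         if len(temp_list) == 1 and temp_list[0] == 0: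
--             return True#不要更新了
--
--     return False
-- ===== SOURCE B (Python) =====
-- def FindComments(firstcomment_reminder_str, comments_list):
--     templates = [t for t in firstcomment_reminder_str.split("\n") if not (t == "" or t == " ")]
--     matching = None
--     for t in templates:
--         s = {i for i, comm in enumerate(comments_list) if t in comm}
--         matching = s if matching is None else matching & s
--         if not matching:
--             break
--     return matching is not None and len(matching) > 0
-- ===== Notes on version B (the rewrite author's own statement) =====
-- stated objective: faster
-- what changed: Transposes the two loops: instead of testing, per comment, whether every template matches (building a 0/1 list and deduplicating it per comment), B folds over the templates intersecting the sets of comment indices that contain each template, breaking as soon as the intersection empties; the None initial accumulator gives False for an empty template list.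
import Mathlib
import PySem

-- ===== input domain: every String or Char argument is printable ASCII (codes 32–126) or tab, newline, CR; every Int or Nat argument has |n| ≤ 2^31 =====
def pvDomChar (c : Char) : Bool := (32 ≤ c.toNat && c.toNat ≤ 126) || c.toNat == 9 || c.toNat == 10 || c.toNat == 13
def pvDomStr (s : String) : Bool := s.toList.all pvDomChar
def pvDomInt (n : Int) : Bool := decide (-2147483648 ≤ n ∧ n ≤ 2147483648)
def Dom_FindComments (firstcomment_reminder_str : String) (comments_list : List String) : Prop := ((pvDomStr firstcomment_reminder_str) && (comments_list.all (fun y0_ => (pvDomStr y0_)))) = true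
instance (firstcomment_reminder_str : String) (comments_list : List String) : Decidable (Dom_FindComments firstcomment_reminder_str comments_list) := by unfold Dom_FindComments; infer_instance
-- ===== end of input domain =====

-- B transposes A's loops: it intersects, template by template, the sets of comment indices
-- containing that template, breaking when it empties (measured faster in a timing run: constant-factor early exit).

-- ===== PORT A =====
def pvAInner (template_list : List String) (comm : String) : Bool :=
  let temp_list := template_list.foldl
    (fun acc t2 => if PySem.Str.isIn t2 comm then acc ++ [(0 : Int)] else acc ++ [(1 : Int)]) []
  -- list(set(temp_list)): set order is only consumed by the order-independent test
  -- len == 1 ∧ first element == 0, so Set.ofList (first-occurrence order) is exact here.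
  let temp_set : PySem.Set Int := PySem.Set.ofList temp_list
  if temp_set.length = 1 then PySem.List.pyGetD temp_set 0 0 == 0 else false

def pvALoop (template_list : List String) : List String → Bool
  | [] => false
  | comm :: rest => if pvAInner template_list comm then true else pvALoop template_list rest

def FindComments (firstcomment_reminder_str : String) (comments_list : List String) : Bool :=
  let template_list := ((PySem.Str.split? firstcomment_reminder_str "\n").getD []).foldl
    (fun acc tl => if tl = " " ∨ tl = "" then acc else acc ++ [tl]) []
  pvALoop template_list comments_list

-- ===== PORT B =====
def pvSetFor (comments_list : List String) (t : String) : PySem.Set Int :=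
  PySem.Set.ofList
    (((PySem.List.enumerate comments_list 0).filter (fun p => PySem.Str.isIn t p.2)).map (·.1))

def pvBLoop (comments_list : List String) : List String → Option (PySem.Set Int) → Option (PySem.Set Int)
  | [], acc => acc
  | t :: ts, acc =>
    let s := pvSetFor comments_list t
    let m := match acc with
      | none => s
      | some m0 => PySem.Set.inter m0 s
    if m.isEmpty then some m else pvBLoop comments_list ts (some m)

def FindComments_alt (firstcomment_reminder_str : String) (comments_list : List String) : Bool :=
  let templates := ((PySem.Str.split? firstcomment_reminder_str "\n").getD []).filter
    (fun t => !(t == "" || t == " "))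
  match pvBLoop comments_list templates none with
  | none => false
  | some m => decide (0 < m.length)

-- ===== PRECONDITION & SPEC =====
def Spec_FindComments (firstcomment_reminder_str : String) (comments_list : List String) (out : Bool) : Prop := out = FindComments_alt firstcomment_reminder_str comments_list
instance (firstcomment_reminder_str : String) (comments_list : List String) (out : Bool) : Decidable (Spec_FindComments firstcomment_reminder_str comments_list out) := by unfold Spec_FindComments; infer_instance

-- ===== CLAIM (what is proved, stated in full; the proofs are below) =====
def Claim_equal_FindComments : Prop := ∀ (firstcomment_reminder_str : String) (comments_list : List String), Dom_FindComments firstcomment_reminder_str comments_list → Spec_FindComments firstcomment_reminder_str comments_list (FindComments firstcomment_reminder_str comments_list)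

-- ===== LEMMAS AND PROOFS =====

-- A's template_list loop is the filter B uses.
lemma pvFoldFilter (l : List String) : ∀ acc : List String,
    l.foldl (fun acc tl => if tl = " " ∨ tl = "" then acc else acc ++ [tl]) acc
      = acc ++ l.filter (fun t => !(t == "" || t == " ")) := by
  induction l with
  | nil => simp
  | cons x l ih =>
    intro acc
    rw [List.foldl_cons, List.filter_cons]
    by_cases hx : x = " " ∨ x = ""
    · have hf : (!(x == "" || x == " ")) = false := by
        rcases hx with h | h <;> simp [h]
      rw [if_pos hx, hf, if_neg (by simp), ih]
    · have hf : (!(x == "" || x == " ")) = true := by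
        rcases not_or.mp hx with ⟨h1, h2⟩; simp [h1, h2]
      rw [if_neg hx, hf, if_pos rfl, ih]
      simp

-- A's inner 0/1 list is a map over the templates.
lemma pvZeroOneMap (comm : String) (l : List String) : ∀ acc : List Int,
    l.foldl (fun acc t2 => if PySem.Str.isIn t2 comm then acc ++ [(0 : Int)] else acc ++ [(1 : Int)]) acc
      = acc ++ l.map (fun t => if PySem.Str.isIn t comm then (0 : Int) else 1) := by
  induction l with
  | nil => simp
  | cons x l ih =>
    intro acc
    rw [List.foldl_cons, List.map_cons]
    by_cases h : PySem.Str.isIn x comm = true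
    · rw [if_pos h, if_pos h, ih]; simp
    · rw [if_neg h, if_neg h, ih]; simp

lemma pvFoldlAddZero : ∀ l : List Int, (∀ x ∈ l, x = 0) →
    l.foldl PySem.Set.add [0] = [0] := by
  intro l
  induction l with
  | nil => intro _; rfl
  | cons x l ih =>
    intro h
    have hx : x = 0 := h x (by simp)
    have : PySem.Set.add [0] x = [0] := by
      simp [PySem.Set.add, PySem.Set.contains, hx]
    simpa [List.foldl_cons, this] using ih (fun y hy => h y (by simp [hy]))

lemma pvOfListZero (l : List Int) (hne : l ≠ []) (h : ∀ x ∈ l, x = 0) :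
    PySem.Set.ofList l = [0] := by
  cases l with
  | nil => exact absurd rfl hne
  | cons x l =>
    have hx : x = 0 := h x (by simp)
    have hadd : PySem.Set.add ([] : PySem.Set Int) x = [0] := by
      simp [PySem.Set.add, PySem.Set.contains, hx]
    rw [PySem.Set.ofList_eq_foldl, List.foldl_cons, hadd]
    exact pvFoldlAddZero l (fun y hy => h y (by simp [hy]))

-- Characterisation of A's inner per-comment test.
lemma pvInnerIff (tl : List String) (comm : String) :
    pvAInner tl comm = true ↔ (tl ≠ [] ∧ ∀ t ∈ tl, PySem.Str.isIn t comm = true) := by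
  unfold pvAInner
  rw [pvZeroOneMap]
  simp only [List.nil_append]
  set f : String → Int := fun t => if PySem.Str.isIn t comm then (0 : Int) else 1 with hf
  set l : List Int := tl.map f with hl
  constructor
  · intro h
    split_ifs at h with hlen
    · have h0 : PySem.List.pyGetD (PySem.Set.ofList l) 0 0 = 0 := by
        simpa using h
      obtain ⟨a, ha⟩ : ∃ a, PySem.Set.ofList l = [a] := by
        cases hsl : PySem.Set.ofList l with
        | nil => rw [hsl] at hlen; simp at hlen
        | cons a rest =>
          rw [hsl] at hlen
          cases rest with
          | nil => exact ⟨a, rfl⟩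
          | cons b r => simp at hlen
      have ha0 : a = 0 := by
        rw [ha] at h0; simpa [pysem] using h0
      have hall : ∀ x ∈ l, x = (0 : Int) := by
        intro x hx
        have : x ∈ PySem.Set.ofList l := (PySem.Set.mem_ofList l x).mpr hx
        rw [ha, ha0] at this; simpa using this
      have hlne : l ≠ [] := by
        intro hnil
        rw [hnil] at ha; simp [PySem.Set.ofList] at ha
      constructor
      · intro hnil
        apply hlne
        rw [hl, hnil, List.map_nil]
      · intro t ht
        have hx := hall (f t) (by rw [hl]; exact List.mem_map_of_mem ht)
        simp only [hf] at hx
        by_contra hnot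
        rw [if_neg hnot] at hx
        exact one_ne_zero hx
  · rintro ⟨hne, hall⟩
    have hlall : ∀ x ∈ l, x = (0 : Int) := by
      intro x hx
      rw [hl] at hx
      obtain ⟨t, ht, rfl⟩ := List.mem_map.mp hx
      simp only [hf]
      rw [if_pos (hall t ht)]
    have hlne : l ≠ [] := by
      rw [hl]; simpa using hne
    rw [pvOfListZero l hlne hlall]
    simp [pysem]

-- A's outer loop is an existential over comments.
lemma pvALoopIff (tl : List String) : ∀ comments : List String,
    pvALoop tl comments = true ↔ ∃ comm ∈ comments, pvAInner tl comm = true := by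
  intro comments
  induction comments with
  | nil => simp [pvALoop]
  | cons c cs ih =>
    by_cases h : pvAInner tl c = true
    · simp [pvALoop, h]
    · simp only [pvALoop, if_neg h, ih]
      constructor
      · rintro ⟨comm, hm, hc⟩; exact ⟨comm, by simp [hm], hc⟩
      · rintro ⟨comm, hm, hc⟩
        rcases List.mem_cons.mp hm with rfl | hm'
        · exact absurd hc h
        · exact ⟨comm, hm', hc⟩

-- Membership in the per-template index set.
lemma pvMemSetFor (comments : List String) (t : String) (j : Int) :
    j ∈ pvSetFor comments t ↔
      ∃ k : Nat, ∃ h : k < comments.length, j = (k : Int) ∧ PySem.Str.isIn t comments[k] = true := by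
  unfold pvSetFor
  rw [PySem.Set.mem_ofList]
  simp only [List.mem_map, List.mem_filter, PySem.List.mem_enumerate_iff]
  constructor
  · rintro ⟨p, ⟨⟨k, hk, rfl⟩, hin⟩, rfl⟩
    exact ⟨k, hk, by simp, by simpa using hin⟩
  · rintro ⟨k, hk, rfl, hin⟩
    exact ⟨((k : Int), comments[k]), ⟨⟨k, hk, by simp⟩, by simpa using hin⟩, rfl⟩

-- B's fold with early break: result membership is the full intersection condition.
lemma pvBLoopSome (comments : List String) : ∀ (ts : List String) (m : PySem.Set Int),
    ∃ m', pvBLoop comments ts (some m) = some m' ∧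
      ∀ j : Int, j ∈ m' ↔ (j ∈ m ∧ ∀ t ∈ ts, j ∈ pvSetFor comments t) := by
  intro ts
  induction ts with
  | nil => intro m; exact ⟨m, rfl, by simp⟩
  | cons t ts ih =>
    intro m
    by_cases he : (PySem.Set.inter m (pvSetFor comments t)).isEmpty = true
    · refine ⟨PySem.Set.inter m (pvSetFor comments t), by simp [pvBLoop, he], ?_⟩
      intro j
      have hnil : PySem.Set.inter m (pvSetFor comments t) = [] := List.isEmpty_iff.mp he
      rw [hnil]
      simp only [List.not_mem_nil, false_iff, not_and]
      intro hjm hall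
      have : j ∈ PySem.Set.inter m (pvSetFor comments t) :=
        (PySem.Set.mem_inter m (pvSetFor comments t) j).mpr ⟨hjm, hall t (by simp)⟩
      rw [hnil] at this; simp at this
    · obtain ⟨m', hrun, hmem⟩ := ih (PySem.Set.inter m (pvSetFor comments t))
      refine ⟨m', by simp [pvBLoop, he, hrun], ?_⟩
      intro j
      rw [hmem j, PySem.Set.mem_inter]
      constructor
      · rintro ⟨⟨h1, h2⟩, h3⟩
        refine ⟨h1, ?_⟩
        intro t' ht'
        rcases List.mem_cons.mp ht' with rfl | h
        · exact h2
        · exact h3 t' h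
      · rintro ⟨h1, h2⟩
        exact ⟨⟨h1, h2 t (by simp)⟩, fun t' ht' => h2 t' (by simp [ht'])⟩

-- B's whole loop starting from None.
lemma pvBLoopNone (comments : List String) (ts : List String) (hne : ts ≠ []) :
    ∃ m', pvBLoop comments ts none = some m' ∧
      ∀ j : Int, j ∈ m' ↔ ∀ t ∈ ts, j ∈ pvSetFor comments t := by
  cases ts with
  | nil => exact absurd rfl hne
  | cons t ts =>
    by_cases he : (pvSetFor comments t).isEmpty = true
    · refine ⟨pvSetFor comments t, by simp [pvBLoop, he], ?_⟩
      intro j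
      have hnil : pvSetFor comments t = [] := List.isEmpty_iff.mp he
      rw [hnil]
      simp only [List.not_mem_nil, false_iff, not_forall]
      refine ⟨t, by simp, ?_⟩
      rw [hnil]; simp
    · obtain ⟨m', hrun, hmem⟩ := pvBLoopSome comments ts (pvSetFor comments t)
      refine ⟨m', by simp [pvBLoop, he, hrun], ?_⟩
      intro j
      rw [hmem j]
      constructor
      · rintro ⟨h1, h2⟩
        intro t' ht'
        rcases List.mem_cons.mp ht' with rfl | h
        · exact h1
        · exact h2 t' h
      · intro h
        exact ⟨h t (by simp), fun t' ht' => h t' (by simp [ht'])⟩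

-- Bridge: a satisfying comment exists iff a satisfying index exists.
lemma pvBridge (comments tl : List String) (hne : tl ≠ []) :
    (∃ comm ∈ comments, ∀ t ∈ tl, PySem.Str.isIn t comm = true) ↔
      (∃ j : Int, ∀ t ∈ tl, j ∈ pvSetFor comments t) := by
  constructor
  · rintro ⟨comm, hm, hall⟩
    obtain ⟨k, hk, rfl⟩ := List.mem_iff_getElem.mp hm
    refine ⟨(k : Int), fun t ht => ?_⟩
    exact (pvMemSetFor comments t (k : Int)).mpr ⟨k, hk, rfl, hall t ht⟩
  · rintro ⟨j, hall⟩
    obtain ⟨t0, ht0⟩ := List.exists_mem_of_ne_nil tl hne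
    obtain ⟨k, hk, rfl, _⟩ := (pvMemSetFor comments t0 j).mp (hall t0 ht0)
    refine ⟨comments[k], List.getElem_mem hk, fun t ht => ?_⟩
    obtain ⟨k', hk', hjk', hin'⟩ := (pvMemSetFor comments t _).mp (hall t ht)
    have : k = k' := by exact_mod_cast hjk'
    subst this
    exact hin'

lemma pvMainIff (s : String) (comments : List String) :
    FindComments s comments = true ↔ FindComments_alt s comments = true := by
  unfold FindComments FindComments_alt
  rw [pvFoldFilter]
  simp only [List.nil_append]
  set tl := ((PySem.Str.split? s "\n").getD []).filter (fun t => !(t == "" || t == " ")) with htl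
  rw [pvALoopIff]
  by_cases hne : tl = []
  · rw [hne]
    simp [pvBLoop, pvInnerIff]
  · obtain ⟨m', hrun, hmem⟩ := pvBLoopNone comments tl hne
    rw [hrun]
    have hlen : (0 < m'.length) ↔ ∃ j : Int, j ∈ m' := by
      constructor
      · intro h
        cases m' with
        | nil => simp at h
        | cons a r => exact ⟨a, by simp⟩
      · rintro ⟨j, hj⟩
        exact List.length_pos_of_mem hj
    simp only [decide_eq_true_eq]
    rw [hlen]
    constructor
    · rintro ⟨comm, hm, hc⟩
      obtain ⟨-, hall⟩ := (pvInnerIff tl comm).mp hc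
      obtain ⟨j, hj⟩ := (pvBridge comments tl hne).mp ⟨comm, hm, hall⟩
      exact ⟨j, (hmem j).mpr hj⟩
    · rintro ⟨j, hj⟩
      obtain ⟨comm, hm, hall⟩ := (pvBridge comments tl hne).mpr ⟨j, (hmem j).mp hj⟩
      exact ⟨comm, hm, (pvInnerIff tl comm).mpr ⟨hne, hall⟩⟩

-- ===== VERDICT (by name: the statement is the Claim_ definition above) =====
theorem FindComments_spec : Claim_equal_FindComments := by
  intro s comments _
  unfold Spec_FindComments
  exact Bool.eq_iff_iff.mpr (pvMainIff s comments)
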